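-- pv_equiv track=rewrite | github.com/jahirulislammolla/CodeFights | Fights/knightsAndKnaves.py | knightsAndKnaves
-- ===== SOURCE A (Python) =====
-- def knightsAndKnaves(answers):
--
--     n = len(answers)
--     isKnight = [False] * n
--     isKnight[0] = True
--     for i in range(1, n):
--         isKnight[i] = (answers[0] >> i & 1)
--     for i in range(n):
--         for j in range(n):
--             if ((isKnight[i] == isKnight[j]) ^
--                     (answers[i] >> j & 1)):
--                 return False
--
--     return True
-- ===== SOURCE B (Python) =====
-- def knightsAndKnaves(answers):
--     # Masks instead of the O(n^2) pairwise loop: the claimed knight set is read off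
--     # the first answer in one bitwise step, then each answer row is one masked comparison.
--     n = len(answers)
--     if n == 0:
--         return True
--     full = (1 << n) - 1
--     knightMask = (answers[0] & full) | 1
--     knaveMask = full - knightMask
--     for i in range(n):
--         expected = knightMask if (knightMask >> i) & 1 else knaveMask
--         if (answers[i] & full) != expected:
--             return False
--     return True
-- ===== Notes on version B (the rewrite author's own statement) =====
-- stated objective: faster
-- what changed: Instead of the O(n^2) pairwise loop testing each answer bit separately, B reads the claimed knight set off the first answer as one bitmask ((answers at index 0, masked to n bits) with bit 0 forced), derives the knave mask as its complement, and compares each answer row, masked to its n low bits, against the single expected mask in one pass.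
import Mathlib
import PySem

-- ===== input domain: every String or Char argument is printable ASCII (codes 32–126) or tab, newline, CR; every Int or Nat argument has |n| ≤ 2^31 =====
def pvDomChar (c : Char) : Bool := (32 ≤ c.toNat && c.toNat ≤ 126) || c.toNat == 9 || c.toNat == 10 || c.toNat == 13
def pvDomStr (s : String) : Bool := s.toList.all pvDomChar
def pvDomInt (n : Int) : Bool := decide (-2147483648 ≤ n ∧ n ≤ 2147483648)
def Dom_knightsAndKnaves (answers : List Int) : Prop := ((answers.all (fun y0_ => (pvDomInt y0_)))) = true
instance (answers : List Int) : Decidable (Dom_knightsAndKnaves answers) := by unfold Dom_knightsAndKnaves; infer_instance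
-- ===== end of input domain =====

-- B replaces A's O(n^2) pairwise bit tests by two precomputed bitmasks and one masked
-- comparison per person (objective: faster, asymptotically fewer Python-level operations).

-- ===== PORT A =====
def knightsAndKnaves (answers : List Int) : Bool :=
  let n := answers.length
  let isKnight : List Bool :=
    (List.range n).map (fun i : Nat =>
      if i = 0 then true
      else PySem.Int.band ((answers.getD 0 0) >>> i) 1 != 0)
  (List.range n).all (fun i =>
    (List.range n).all (fun j : Nat =>
      ! (decide (isKnight.getD i false = isKnight.getD j false) ^^
         (PySem.Int.band ((answers.getD i 0) >>> j) 1 != 0))))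

-- ===== PORT B =====
def knightsAndKnaves_alt (answers : List Int) : Bool :=
  let n := answers.length
  if n = 0 then true
  else
    let full : Int := ((1:Int) <<< n) - 1
    let knightMask : Int := PySem.Int.bor (PySem.Int.band (answers.getD 0 0) full) 1
    let knaveMask := full - knightMask
    (List.range n).all (fun i =>
      PySem.Int.band (answers.getD i 0) full ==
        (if PySem.Int.band (knightMask >>> i) 1 != 0 then knightMask else knaveMask))

-- ===== PRECONDITION & SPEC =====
-- Python A assigns True to entry 0 of isKnight, which raises IndexError on the empty list.
def Pre_knightsAndKnaves (answers : List Int) : Prop := answers ≠ []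
instance (answers : List Int) : Decidable (Pre_knightsAndKnaves answers) := by
  unfold Pre_knightsAndKnaves; infer_instance
def pvWitness_knightsAndKnaves : List Int := [1]

def Spec_knightsAndKnaves (answers : List Int) (out : Bool) : Prop := out = knightsAndKnaves_alt answers
instance (answers : List Int) (out : Bool) : Decidable (Spec_knightsAndKnaves answers out) := by
  unfold Spec_knightsAndKnaves; infer_instance

-- ===== CLAIM (what is proved, stated in full; the proofs are below) =====
def Claim_equal_knightsAndKnaves : Prop := ∀ (answers : List Int), Dom_knightsAndKnaves answers → Pre_knightsAndKnaves answers → Spec_knightsAndKnaves answers (knightsAndKnaves answers)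

-- ===== LEMMAS AND PROOFS =====

-- the j-th binary digit of x, as Python's (x >> j) & 1 computes it
def pvBit (x : Int) (j : Nat) : Int := (x / 2^j) % 2

-- who person i is, as read off answers[0] (person 0 forced to knight)
def pvIsK (a0 : Int) (i : Nat) : Bool := decide (i = 0) || decide (pvBit a0 i = 1)

-- the integer with binary digits d 0, …, d (n-1)
def pvDsum (d : Nat → Int) (n : Nat) : Int := ((List.range n).map (fun j => d j * 2^j)).sum

theorem pvBit01 (x : Int) (j : Nat) : pvBit x j = 0 ∨ pvBit x j = 1 := by
  unfold pvBit; omega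

theorem pv_band_one_sr (x : Int) (j : Nat) :
    PySem.Int.band (x >>> j) 1 = pvBit x j := by
  rw [Int.shiftRight_eq_div_pow, PySem.Int.band_one,
      PySem.Int.mod_eq_emod_of_pos (by norm_num)]
  push_cast [pvBit]
  rfl

theorem pv_ne_zero_beq (b : Int) (h : b = 0 ∨ b = 1) : (b != 0) = decide (b = 1) := by
  rcases h with h | h <;> simp [h]

theorem pv_emod_split (x k : Int) (h : 0 < k) :
    x % (k * 2) = x % k + (x / k % 2) * k := by
  have h1 := Int.emod_add_mul_ediv x (k*2)
  have h3 : x % (k*2) % k = x % k := Int.emod_emod_of_dvd x ⟨2, rfl⟩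
  have h4 := Int.emod_add_mul_ediv (x % (k*2)) k
  have h5 : 0 ≤ x % (k*2) := Int.emod_nonneg x (by positivity)
  have h6 : x % (k*2) < k*2 := Int.emod_lt_of_pos x (by positivity)
  have h7 : x % (k*2) / k < 2 := by
    rw [Int.ediv_lt_iff_lt_mul h]; linarith
  have h8 : 0 ≤ x % (k*2) / k := Int.ediv_nonneg h5 (le_of_lt h)
  have h9 : x / k = x % (k*2) / k + 2 * (x / (k*2)) := by
    conv_lhs => rw [← h1]
    rw [show x % (k*2) + k*2*(x/(k*2)) = x % (k*2) + (2*(x/(k*2)))*k by ring,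
        Int.add_mul_ediv_right _ _ (ne_of_gt h)]
  have h10 : x / k % 2 = x % (k*2) / k := by
    rw [h9, Int.add_mul_emod_self_left]
    exact Int.emod_eq_of_lt h8 h7
  rw [h10, ← h3]; linarith [h4, mul_comm k (x % (k*2) / k)]


theorem pv_band_mask (x : Int) (n : Nat) :
    PySem.Int.band x ((2:Int) ^ n - 1) = x % 2 ^ n := by
  have h2 : ((2:Int)^n) = ((2^n : Nat) : Int) := by push_cast; ring
  have hF : 0 < 2^n := Nat.two_pow_pos n
  have ht : ((2:Int)^n - 1).toNat = 2^n - 1 := by omega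
  rcases x with m | m
  · show PySem.Int.band (m : Int) _ = _
    rw [PySem.Int.band_of_nonneg (by positivity) (by omega), ht, Int.toNat_natCast,
        Nat.and_two_pow_sub_one_eq_mod, h2]
    push_cast
    rfl
  · unfold PySem.Int.band
    have hneg : ¬ (0 ≤ Int.negSucc m) := by simp [Int.negSucc_eq]; omega
    rw [if_neg hneg, if_pos (by omega : (0:Int) ≤ 2^n - 1)]
    have hm : (-(Int.negSucc m) - 1).toNat = m := by simp [Int.negSucc_eq]
    rw [ht, hm, Nat.and_comm, Nat.and_two_pow_sub_one_eq_mod]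
    obtain ⟨q, r, hqr, hr⟩ : ∃ q r, m = 2^n * q + r ∧ r < 2^n :=
      ⟨m / 2^n, m % 2^n, (Nat.div_add_mod m (2^n)).symm, Nat.mod_lt _ hF⟩
    have hmr : m % 2^n = r := by
      rw [hqr, Nat.mul_add_mod, Nat.mod_eq_of_lt hr]
    rw [hmr]
    have hc : ((2^n - 1 - r : Nat) : Int) = (2:Int)^n - 1 - r := by omega
    have hm2 : (m : Int) = (2:Int)^n * q + r := by rw [hqr]; push_cast; ring
    have hrepr : Int.negSucc m =
        ((2^n - 1 - r : Nat) : Int) + (2:Int)^n * (-(q:Int) - 1) := by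
      rw [Int.negSucc_eq, hc, hm2]; ring
    rw [hrepr, Int.add_mul_emod_self_left,
        Int.emod_eq_of_lt (by positivity) (by omega)]

theorem pv_dsum_zero (d : Nat → Int) : pvDsum d 0 = 0 := rfl

theorem pv_dsum_succ (d : Nat → Int) (n : Nat) :
    pvDsum d (n + 1) = pvDsum d n + d n * 2 ^ n := by
  unfold pvDsum
  rw [List.range_succ, List.map_append, List.sum_append]
  simp

theorem pv_dsum_bounds (d : Nat → Int) (n : Nat) (h : ∀ j, j < n → d j = 0 ∨ d j = 1) :
    0 ≤ pvDsum d n ∧ pvDsum d n < 2 ^ n := by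
  induction n with
  | zero => simp [pv_dsum_zero]
  | succ m ih =>
    have hm := ih (fun j hj => h j (by omega))
    have hd := h m (by omega)
    rw [pv_dsum_succ, pow_succ]
    rcases hd with hd | hd <;> rw [hd] <;> constructor <;> nlinarith [hm.1, hm.2]

theorem pv_dsum_digit (d : Nat → Int) (n : Nat) (h : ∀ j, j < n → d j = 0 ∨ d j = 1)
    (j : Nat) (hj : j < n) : pvBit (pvDsum d n) j = d j := by
  induction n with
  | zero => omega
  | succ m ih =>
    have hbnd := pv_dsum_bounds d m (fun t ht => h t (by omega))
    rw [pv_dsum_succ]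
    by_cases hjm : j = m
    · subst hjm
      unfold pvBit
      rw [Int.add_mul_ediv_right _ _ (by positivity : (2:Int)^j ≠ 0),
          Int.ediv_eq_zero_of_lt hbnd.1 hbnd.2]
      rcases h j (by omega) with hd | hd <;> rw [hd] <;> norm_num
    · have hjlt : j < m := by omega
      unfold pvBit
      have hsplit : d m * 2 ^ m = ((d m * 2 ^ (m - j - 1)) * 2) * 2 ^ j := by
        have : 2 ^ m = (2:Int) ^ (m - j - 1) * 2 * 2 ^ j := by
          rw [mul_assoc, ← pow_succ', ← pow_add]
          congr 1
          omega
        rw [this]; ring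
      rw [hsplit, Int.add_mul_ediv_right _ _ (by positivity : (2:Int)^j ≠ 0)]
      rw [Int.add_mul_emod_self_right]
      exact ih (fun t ht => h t (by omega)) hjlt

theorem pv_emod_eq_dsum (x : Int) (n : Nat) :
    x % 2 ^ n = pvDsum (fun j => pvBit x j) n := by
  induction n with
  | zero => simp [pv_dsum_zero]
  | succ m ih =>
    rw [pv_dsum_succ, ← ih, pow_succ, pv_emod_split x (2^m) (by positivity)]
    rfl

theorem pv_dsum_eq_iff (x : Int) (n : Nat) (d : Nat → Int)
    (h : ∀ j, j < n → d j = 0 ∨ d j = 1) :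
    x % 2 ^ n = pvDsum d n ↔ ∀ j, j < n → pvBit x j = d j := by
  constructor
  · intro he j hj
    have h1 : pvBit (pvDsum (fun t => pvBit x t) n) j = pvBit x j :=
      pv_dsum_digit _ n (fun t _ => pvBit01 x t) j hj
    have h2 : pvBit (pvDsum d n) j = d j := pv_dsum_digit d n h j hj
    rw [← h1, ← pv_emod_eq_dsum, he, h2]
  · intro hb
    rw [pv_emod_eq_dsum x n]
    unfold pvDsum
    congr 1
    apply List.map_congr_left
    intro j hj
    show pvBit x j * 2 ^ j = d j * 2 ^ j
    rw [hb j (List.mem_range.mp hj)]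

-- A's isKnight list entry i (i < n) is pvIsK of answers[0]
theorem pv_isKnight_entry (a0 : Int) (n i : Nat) (hi : i < n) :
    ((List.range n).map (fun i : Nat => if i = 0 then true
        else PySem.Int.band (a0 >>> i) 1 != 0)).getD i false = pvIsK a0 i := by
  rw [PySem.List.getD_map_range _ n i false hi]
  by_cases h0 : i = 0
  · simp [h0, pvIsK]
  · rw [if_neg h0, pv_band_one_sr, pv_ne_zero_beq _ (pvBit01 a0 i)]
    simp [pvIsK, h0]

-- bits of a nonnegative number, Nat-side
theorem pv_testBit_one (j : Nat) : (1:Nat).testBit j = decide (j = 0) := by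
  rcases j with _ | t
  · decide
  · simp [Nat.testBit_succ]

theorem pv_bit_natCast (k j : Nat) : pvBit (k : Int) j = if k.testBit j then 1 else 0 := by
  unfold pvBit
  rw [Nat.testBit_eq_decide_div_mod_eq]
  have h2 : ((2:Int)^j) = ((2^j : Nat) : Int) := by push_cast; ring
  rw [h2, ← Int.natCast_ediv]
  have h3 : ((k / 2^j : Nat) : Int) % 2 = ((k / 2^j % 2 : Nat) : Int) := by push_cast; ring
  rw [h3]
  have := Nat.mod_lt (k / 2^j) (y := 2) (by norm_num)
  interval_cases h : (k / 2^j % 2) <;> simp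

-- low digits of x % 2^n are the digits of x
theorem pv_bit_emod (x : Int) (n j : Nat) (hj : j < n) :
    pvBit (x % 2^n) j = pvBit x j := by
  rw [pv_emod_eq_dsum x n]
  exact pv_dsum_digit _ n (fun t _ => pvBit01 x t) j hj

theorem pv_full_eq (n : Nat) : ((1:Int) <<< n) - 1 = 2 ^ n - 1 := by
  rw [Int.shiftLeft_eq]; ring

-- B's knightMask (answers[0] & full) | 1 is the digit sum of pvIsK
theorem pv_knightMask_eq (a0 : Int) (n : Nat) (hn : 0 < n) :
    PySem.Int.bor (PySem.Int.band a0 (((1:Int) <<< n) - 1)) 1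
      = pvDsum (fun j => if pvIsK a0 j then 1 else 0) n := by
  rw [pv_full_eq, pv_band_mask]
  have hp : (0:Int) < 2 ^ n := by positivity
  have hnn : 0 ≤ a0 % 2^n := Int.emod_nonneg _ (by positivity)
  have hlt : a0 % 2^n < 2^n := Int.emod_lt_of_pos _ hp
  have h2 : ((2:Int)^n) = ((2^n : Nat) : Int) := by push_cast; ring
  set m := (a0 % 2^n).toNat with hmdef
  have hm0 : a0 % 2^n = (m : Int) := (Int.toNat_of_nonneg hnn).symm
  have hmlt : m < 2^n := by omega
  have h1n : 1 < 2^n := by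
    have : 2^1 ≤ 2^n := Nat.pow_le_pow_right (by norm_num) hn
    omega
  rw [hm0, show (1:Int) = ((1:Nat):Int) from rfl, PySem.Int.bor_natCast]
  have hor : m ||| 1 < 2^n := Nat.or_lt_two_pow hmlt h1n
  have hself : ((m ||| 1 : Nat) : Int) % 2^n = ((m ||| 1 : Nat) : Int) :=
    Int.emod_eq_of_lt (by positivity) (by omega)
  rw [← hself,
      pv_dsum_eq_iff _ n _ (by intro t _; by_cases h : pvIsK a0 t <;> simp [h])]
  intro j hj
  have hbm : pvBit ((m : Nat) : Int) j = pvBit a0 j := by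
    rw [← hm0]; exact pv_bit_emod a0 n j hj
  have hb2 : (if m.testBit j then (1:Int) else 0) = pvBit a0 j :=
    (pv_bit_natCast m j).symm.trans hbm
  rw [pv_bit_natCast, Nat.testBit_or, pv_testBit_one]
  by_cases hj0 : j = 0 <;> by_cases htb : m.testBit j <;>
    simp [pvIsK, hj0, htb] at hb2 ⊢ <;> omega

theorem pv_dsum_sub (d : Nat → Int) (n : Nat) :
    (2:Int) ^ n - 1 - pvDsum d n = pvDsum (fun j => 1 - d j) n := by
  induction n with
  | zero => simp [pv_dsum_zero]
  | succ m ih => rw [pv_dsum_succ, pv_dsum_succ, ← ih]; ring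

-- the expected mask for person i
theorem pv_expected_eq (a0 : Int) (n i : Nat) :
    (if pvIsK a0 i then pvDsum (fun j => if pvIsK a0 j then 1 else 0) n
     else (2:Int) ^ n - 1 - pvDsum (fun j => if pvIsK a0 j then 1 else 0) n)
    = pvDsum (fun j => if pvIsK a0 j = pvIsK a0 i then 1 else 0) n := by
  by_cases hi : pvIsK a0 i
  · rw [if_pos hi]
    unfold pvDsum
    congr 1
    apply List.map_congr_left
    intro j _
    by_cases hj : pvIsK a0 j <;> simp [hj, hi]
  · rw [if_neg hi, pv_dsum_sub]
    unfold pvDsum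
    congr 1
    apply List.map_congr_left
    intro j _
    by_cases hj : pvIsK a0 j <;>
      simp [hj, Bool.eq_false_iff.mpr hi, eq_comm]

-- B's per-person check, characterised by digits
theorem pv_B_row_iff (x a0 : Int) (n i : Nat) (hi : i < n) :
    (PySem.Int.band x (((1:Int) <<< n) - 1) ==
      (if PySem.Int.band
            ((pvDsum (fun j => if pvIsK a0 j then 1 else 0) n) >>> i) 1 != 0
       then pvDsum (fun j => if pvIsK a0 j then 1 else 0) n
       else (((1:Int) <<< n) - 1) - pvDsum (fun j => if pvIsK a0 j then 1 else 0) n)) = true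
    ↔ ∀ j, j < n → (pvBit x j = 1 ↔ pvIsK a0 j = pvIsK a0 i) := by
  have hdig : ∀ j, j < n → (if pvIsK a0 j then (1:Int) else 0) = 0 ∨
      (if pvIsK a0 j then (1:Int) else 0) = 1 := by
    intro j _; by_cases h : pvIsK a0 j <;> simp [h]
  have hsel : (PySem.Int.band
      ((pvDsum (fun j => if pvIsK a0 j then 1 else 0) n) >>> i) 1 != 0) = pvIsK a0 i := by
    rw [pv_band_one_sr, pv_dsum_digit _ n hdig i hi]
    by_cases h : pvIsK a0 i <;> simp [h]
  rw [hsel, pv_full_eq, pv_band_mask, beq_iff_eq, pv_expected_eq a0 n i,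
      pv_dsum_eq_iff x n _ (by intro j _; by_cases h : pvIsK a0 j = pvIsK a0 i <;> simp [h])]
  constructor
  · intro h j hj
    have := h j hj
    by_cases hc : pvIsK a0 j = pvIsK a0 i <;> simp [hc] at this ⊢ <;> omega
  · intro h j hj
    have := h j hj
    by_cases hc : pvIsK a0 j = pvIsK a0 i <;> simp [hc] at this ⊢ <;>
      rcases pvBit01 x j with hb | hb <;> omega

-- A's pairwise check for the pair (i, j), characterised the same way
theorem pv_A_cell_iff (x a0 : Int) (n i j : Nat) (hi : i < n) (hj : j < n) :
    (! (decide ((((List.range n).map (fun t : Nat => if t = 0 then true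
            else PySem.Int.band (a0 >>> t) 1 != 0)).getD i false) =
          (((List.range n).map (fun t : Nat => if t = 0 then true
            else PySem.Int.band (a0 >>> t) 1 != 0)).getD j false)) ^^
        (PySem.Int.band (x >>> j) 1 != 0))) = true
    ↔ (pvBit x j = 1 ↔ pvIsK a0 j = pvIsK a0 i) := by
  rw [pv_isKnight_entry a0 n i hi, pv_isKnight_entry a0 n j hj,
      pv_band_one_sr, pv_ne_zero_beq _ (pvBit01 x j)]
  rcases pvBit01 x j with hb | hb <;>
    by_cases hik : pvIsK a0 i = pvIsK a0 j <;>
      simp [hb, hik, eq_comm]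

-- ===== VERDICT (by name: the statement is the Claim_ definition above) =====
theorem knightsAndKnaves_spec : Claim_equal_knightsAndKnaves := by
  intro answers _ hpre
  show knightsAndKnaves answers = knightsAndKnaves_alt answers
  have hn : 0 < answers.length := by
    cases answers with
    | nil => exact absurd rfl hpre
    | cons a t => simp
  simp only [knightsAndKnaves, knightsAndKnaves_alt]
  rw [if_neg (by omega : ¬ answers.length = 0),
      pv_knightMask_eq (answers.getD 0 0) answers.length hn]
  rw [Bool.eq_iff_iff]
  simp only [List.all_eq_true, List.mem_range]
  constructor
  · intro hA i hi
    rw [pv_B_row_iff (answers.getD i 0) (answers.getD 0 0) answers.length i hi]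
    intro j hj
    have h := hA i hi j hj
    rw [pv_A_cell_iff (answers.getD i 0) (answers.getD 0 0) answers.length i j hi hj] at h
    exact h
  · intro hB i hi j hj
    rw [pv_A_cell_iff (answers.getD i 0) (answers.getD 0 0) answers.length i j hi hj]
    have h := hB i hi
    rw [pv_B_row_iff (answers.getD i 0) (answers.getD 0 0) answers.length i hi] at h
    exact h j hj
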